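-- pv_equiv track=rewrite | github.com/aybikeyesm/AI-Resume-Analyzer | app.py | predict_role
-- ===== SOURCE A (Python) =====
-- from typing import Dict, List, Tuple
--
-- ROLE_KEYWORDS = {
--     "Data Analyst": ["sql", "excel", "power bi", "tableau", "data analysis", "statistics", "python"],
--     "Machine Learning / AI": ["machine learning", "deep learning", "python", "tensorflow", "pytorch", "nlp"],
--     "Software Developer": ["python", "java", "c++", "javascript", "html", "css", "api", "git"],
--     "Marketing / Content": ["marketing", "writing", "content writing", "social media", "communication"],
--     "Project / Operations": ["project management", "leadership", "communication", "collaboration", "time management"],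
--     "Healthcare / Rehabilitation": ["healthcare", "clinical", "rehabilitation", "physiotherapy", "communication"],
--     "Research / Academic": ["research", "analysis", "writing", "statistics", "presentation", "documentation"]
-- }
--
-- def predict_role(cv_text: str, t: Dict[str, str]) -> str:
--     text = cv_text.lower()
--     scores = {}
--     for role, keywords in ROLE_KEYWORDS.items():
--         role_score = 0
--         for keyword in keywords:
--             if keyword.lower() in text:
--                 role_score += 1
--         scores[role] = role_score
--     best_role = max(scores, key=scores.get)
--     if scores[best_role] == 0:
--         return t.get("role_undetermined", "General / Undetermined")
--     return best_role
-- ===== SOURCE B (Python) =====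
-- ROLE_KEYWORDS = {
--     "Data Analyst": ["sql", "excel", "power bi", "tableau", "data analysis", "statistics", "python"],
--     "Machine Learning / AI": ["machine learning", "deep learning", "python", "tensorflow", "pytorch", "nlp"],
--     "Software Developer": ["python", "java", "c++", "javascript", "html", "css", "api", "git"],
--     "Marketing / Content": ["marketing", "writing", "content writing", "social media", "communication"],
--     "Project / Operations": ["project management", "leadership", "communication", "collaboration", "time management"],
--     "Healthcare / Rehabilitation": ["healthcare", "clinical", "rehabilitation", "physiotherapy", "communication"],
--     "Research / Academic": ["research", "analysis", "writing", "statistics", "presentation", "documentation"]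
-- }
--
-- def predict_role(cv_text: str, t: dict) -> str:
--     text = cv_text.lower()
--     # inverted index: keyword -> roles listing it (each shared keyword gets ONE entry)
--     index = {}
--     for role, keywords in ROLE_KEYWORDS.items():
--         for kw in keywords:
--             index.setdefault(kw, []).append(role)
--     # keyword-major scoring: one substring test per distinct keyword, bump that keyword's roles
--     scores = dict.fromkeys(ROLE_KEYWORDS, 0)
--     for kw, roles in index.items():
--         if kw in text:
--             for role in roles:
--                 scores[role] += 1
--     best = max(scores.values())
--     if best == 0:
--         return t.get("role_undetermined", "General / Undetermined")
--     return next(r for r in scores if scores[r] == best)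
-- ===== Notes on version B (the rewrite author's own statement) =====
-- stated objective: alternative
-- what changed: A scans role-major, substring-testing every (role, keyword) pair into a scores dict and taking max(scores, key=scores.get); B builds an inverted keyword->roles index, runs one substring test per distinct keyword bumping that keyword's roles, then takes the max over the values and returns the first role whose score equals it.
import Mathlib
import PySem

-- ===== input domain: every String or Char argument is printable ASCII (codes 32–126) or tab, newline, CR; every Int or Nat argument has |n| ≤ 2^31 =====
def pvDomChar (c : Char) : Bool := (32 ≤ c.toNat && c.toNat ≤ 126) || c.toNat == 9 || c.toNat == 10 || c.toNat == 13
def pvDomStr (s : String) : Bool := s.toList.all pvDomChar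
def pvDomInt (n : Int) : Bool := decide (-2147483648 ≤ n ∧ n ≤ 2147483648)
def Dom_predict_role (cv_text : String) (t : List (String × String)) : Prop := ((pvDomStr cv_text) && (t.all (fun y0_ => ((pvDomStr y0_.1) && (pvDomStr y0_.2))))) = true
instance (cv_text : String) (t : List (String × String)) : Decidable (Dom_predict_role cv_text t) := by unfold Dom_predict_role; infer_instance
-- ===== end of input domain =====

-- B replaces A's role-major keyword scanning (a scores dict + max(key=...)) by an inverted
-- keyword->roles index: one substring test per distinct keyword bumps that keyword's roles,
-- then max over the values and a first-key search; alternative decomposition, same results.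


-- ===== PORT A =====
-- ROLE_KEYWORDS: module constant of Source A, shared by both implementations
def pvRoleKeywords : List (String × List String) :=
  [("Data Analyst", ["sql", "excel", "power bi", "tableau", "data analysis", "statistics", "python"]),
   ("Machine Learning / AI", ["machine learning", "deep learning", "python", "tensorflow", "pytorch", "nlp"]),
   ("Software Developer", ["python", "java", "c++", "javascript", "html", "css", "api", "git"]),
   ("Marketing / Content", ["marketing", "writing", "content writing", "social media", "communication"]),
   ("Project / Operations", ["project management", "leadership", "communication", "collaboration", "time management"]),
   ("Healthcare / Rehabilitation", ["healthcare", "clinical", "rehabilitation", "physiotherapy", "communication"]),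
   ("Research / Academic", ["research", "analysis", "writing", "statistics", "presentation", "documentation"])]

-- the scores dict A's first loop builds (helper for readability; the loop is A's)
def pvScoresA (text : String) : PySem.Dict String Int :=
  pvRoleKeywords.foldl (fun scores rk =>
    scores.insert rk.1
      (rk.2.foldl (fun role_score keyword =>
        if PySem.Str.isIn (PySem.Str.lower keyword) text then role_score + 1 else role_score) 0))
    PySem.Dict.empty

-- max(scores, key=scores.get) iterates the dict's keys in insertion order and returns the FIRST key with
-- maximal value; since keys are unique this is PySem.List.max? over scores.items by the value component.
-- scores[best_role] is a present-key lookup, ported as getD; the `none` branch is unreachable (7 roles).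
def predict_role (cv_text : String) (t : List (String × String)) : String :=
  let scores := pvScoresA (PySem.Str.lower cv_text)
  (PySem.List.max? scores.items (fun kv => kv.2)).elim ""
    (fun best =>
      if scores.getD best.1 0 = 0 then PySem.Dict.getD ⟨t⟩ "role_undetermined" "General / Undetermined"
      else best.1)

-- ===== PORT B =====
-- B's inverted index: index.setdefault(kw, []).append(role) keeps an existing key's position and
-- extends its list, a new key is appended with [role] — exactly Dict.insert kw (getD kw [] ++ [role])
def pvIndexB : PySem.Dict String (List String) :=
  pvRoleKeywords.foldl (fun idx rk =>
    rk.2.foldl (fun idx kw => idx.insert kw ((idx.getD kw []) ++ [rk.1])) idx) PySem.Dict.empty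

-- dict.fromkeys(ROLE_KEYWORDS, 0): the role names (unique) each mapped to 0, in order
def pvInitScores : PySem.Dict String Int :=
  PySem.Dict.ofList (pvRoleKeywords.map (fun rk => (rk.1, 0)))

-- scores[role] += 1 (role always a present key)
def pvBump (s : PySem.Dict String Int) (role : String) : PySem.Dict String Int :=
  s.insert role (s.getD role 0 + 1)

-- B's keyword-major scoring loop: for kw, roles in index.items(): if kw in text: bump each role
def pvScoresB (text : String) : PySem.Dict String Int :=
  pvIndexB.items.foldl (fun scores kv =>
    if PySem.Str.isIn kv.1 text then kv.2.foldl pvBump scores else scores) pvInitScores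

-- max(scores.values()) raises only on an empty dict (unreachable: 7 roles), ported total via getD;
-- next(r for r in scores if scores[r] == best) is the first key whose value equals best
def predict_role_alt (cv_text : String) (t : List (String × String)) : String :=
  let scores := pvScoresB (PySem.Str.lower cv_text)
  let best := (PySem.List.max? scores.values (fun v => v)).getD 0
  if best = 0 then PySem.Dict.getD ⟨t⟩ "role_undetermined" "General / Undetermined"
  else (scores.keys.find? (fun r => scores.getD r 0 == best)).getD ""

-- ===== PRECONDITION & SPEC =====
def Spec_predict_role (cv_text : String) (t : List (String × String)) (out : String) : Prop := out = predict_role_alt cv_text t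
instance (cv_text : String) (t : List (String × String)) (out : String) : Decidable (Spec_predict_role cv_text t out) := by unfold Spec_predict_role; infer_instance

-- ===== CLAIM (what is proved, stated in full; the proofs are below) =====
def Claim_equal_predict_role : Prop := ∀ (cv_text : String) (t : List (String × String)), Dom_predict_role cv_text t → Spec_predict_role cv_text t (predict_role cv_text t)

-- ===== LEMMAS AND PROOFS =====

-- the substring test after lowering the CV text
def pvC (text : String) : String → Bool := fun kw => PySem.Str.isIn kw text

-- the common mathematical content: each role paired with its keyword count
def pvM (text : String) : List (String × Int) :=
  pvRoleKeywords.map (fun rk => (rk.1, ((rk.2.countP (pvC text) : Nat) : Int)))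

-- A's running-max step (the body of PySem.List.max? with key = value component)
def pvGA (acc : Option (String × Int)) (x : String × Int) : Option (String × Int) :=
  match acc with
  | none => some x
  | some m => if m.2 < x.2 then some x else some m

-- every keyword of every role is already lowercase
lemma pv_lower_fix : ∀ rk ∈ pvRoleKeywords, ∀ k ∈ rk.2, PySem.Str.lower k = k := by decide

-- A's dict items are exactly the role/count pairs
lemma pv_scoresA_items (text : String) : (pvScoresA text).items = pvM text := by
  have hcong : pvScoresA text =
      pvRoleKeywords.foldl (fun d rk => d.insert rk.1 ((rk.2.countP (pvC text) : Nat) : Int))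
        PySem.Dict.empty := by
    unfold pvScoresA
    refine PySem.List.foldl_congr_mem _ _ _ _ ?_
    intro d rk hrk
    have h1 : ∀ k ∈ rk.2,
        (PySem.Str.isIn (PySem.Str.lower k) text = true ↔ pvC text k = true) := by
      intro k hk
      rw [pv_lower_fix rk hrk k hk]
      simp [pvC]
    rw [PySem.List.foldl_if_add_one, zero_add, List.countP_congr h1]
  rw [hcong]
  simp [pvRoleKeywords, pvM, PySem.Dict.insert, PySem.Dict.contains, PySem.Dict.empty]

-- max? by the value component is the pvGA fold
lemma pv_max_eq (L : List (String × Int)) :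
    PySem.List.max? L (fun kv => kv.2) = L.foldl pvGA none := by
  unfold PySem.List.max?
  refine PySem.List.foldl_congr_mem _ _ _ _ ?_
  intro acc x _
  cases acc <;> rfl

-- the inverted index, evaluated (the build loop runs on constants only)
lemma pvIndexB_items : pvIndexB.items =
  [("sql", ["Data Analyst"]), ("excel", ["Data Analyst"]), ("power bi", ["Data Analyst"]), ("tableau", ["Data Analyst"]),
  ("data analysis", ["Data Analyst"]), ("statistics", ["Data Analyst", "Research / Academic"]),
  ("python", ["Data Analyst", "Machine Learning / AI", "Software Developer"]),
  ("machine learning", ["Machine Learning / AI"]), ("deep learning", ["Machine Learning / AI"]),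
  ("tensorflow", ["Machine Learning / AI"]), ("pytorch", ["Machine Learning / AI"]), ("nlp", ["Machine Learning / AI"]),
  ("java", ["Software Developer"]), ("c++", ["Software Developer"]), ("javascript", ["Software Developer"]),
  ("html", ["Software Developer"]), ("css", ["Software Developer"]), ("api", ["Software Developer"]),
  ("git", ["Software Developer"]), ("marketing", ["Marketing / Content"]),
  ("writing", ["Marketing / Content", "Research / Academic"]), ("content writing", ["Marketing / Content"]),
  ("social media", ["Marketing / Content"]),
  ("communication", ["Marketing / Content", "Project / Operations", "Healthcare / Rehabilitation"]),
  ("project management", ["Project / Operations"]), ("leadership", ["Project / Operations"]),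
  ("collaboration", ["Project / Operations"]), ("time management", ["Project / Operations"]),
  ("healthcare", ["Healthcare / Rehabilitation"]), ("clinical", ["Healthcare / Rehabilitation"]),
  ("rehabilitation", ["Healthcare / Rehabilitation"]), ("physiotherapy", ["Healthcare / Rehabilitation"]),
  ("research", ["Research / Academic"]), ("analysis", ["Research / Academic"]),
  ("presentation", ["Research / Academic"]), ("documentation", ["Research / Academic"])] := by
  set_option maxRecDepth 4096 in decide

-- a bump loop leaves the key list unchanged when every bumped role is already a key
lemma pv_keys_bump (rs : List String) : ∀ (s : PySem.Dict String Int),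
    (∀ r ∈ rs, s.contains r = true) → (rs.foldl pvBump s).keys = s.keys := by
  induction rs with
  | nil => intro s _; rfl
  | cons a rs ih =>
    intro s h
    have ha := h a List.mem_cons_self
    have hk : (pvBump s a).keys = s.keys := PySem.Dict.keys_insert_of_contains s _ ha
    rw [List.foldl_cons, ih (pvBump s a) (fun r hr => by
      rw [pvBump, PySem.Dict.contains_insert]
      simp [h r (List.mem_cons_of_mem a hr)])]
    exact hk

-- a bump loop adds the multiplicity of the role to its entry
lemma pv_getD_bump (rs : List String) : ∀ (s : PySem.Dict String Int) (r : String),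
    (rs.foldl pvBump s).getD r 0 = s.getD r 0 + (rs.count r : Int) := by
  induction rs with
  | nil => intro s r; simp
  | cons a rs ih =>
    intro s r
    rw [List.foldl_cons, ih, pvBump, PySem.Dict.getD_insert]
    by_cases h : r = a
    · subst h
      simp
      ring
    · simp [h, Ne.symm h]

-- the scoring loop leaves the key list unchanged
lemma pv_keys_scoreloop (text : String) (L : List (String × List String)) :
    ∀ (s : PySem.Dict String Int), (∀ kv ∈ L, ∀ r ∈ kv.2, s.contains r = true) →
    (L.foldl (fun scores kv =>
      if PySem.Str.isIn kv.1 text then kv.2.foldl pvBump scores else scores) s).keys = s.keys := by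
  induction L with
  | nil => intro s _; rfl
  | cons kv L ih =>
    intro s h
    have hstep : (if PySem.Str.isIn kv.1 text then kv.2.foldl pvBump s else s).keys = s.keys := by
      split_ifs
      · exact pv_keys_bump kv.2 s (h kv List.mem_cons_self)
      · rfl
    rw [List.foldl_cons, ih _ (fun kv' hkv' r hr => by
      rw [PySem.Dict.contains_iff_mem_keys, hstep, ← PySem.Dict.contains_iff_mem_keys]
      exact h kv' (List.mem_cons_of_mem kv hkv') r hr)]
    exact hstep

-- the scoring loop adds, per keyword entry, its contribution to the role's score
lemma pv_getD_scoreloop (text : String) (L : List (String × List String)) :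
    ∀ (s : PySem.Dict String Int) (r : String),
    (L.foldl (fun scores kv =>
      if PySem.Str.isIn kv.1 text then kv.2.foldl pvBump scores else scores) s).getD r 0
    = s.getD r 0 + (L.map (fun kv => if PySem.Str.isIn kv.1 text then (kv.2.count r : Int) else 0)).sum := by
  induction L with
  | nil => intro s r; simp
  | cons kv L ih =>
    intro s r
    rw [List.foldl_cons, ih, List.map_cons, List.sum_cons]
    split_ifs with h
    · rw [pv_getD_bump]; ring
    · ring

-- summing the index contributions of one role gives exactly that role's keyword count
set_option maxHeartbeats 1000000 in
lemma pv_contrib (text : String) : ∀ rk ∈ pvRoleKeywords,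
    (pvIndexB.items.map (fun kv => if PySem.Str.isIn kv.1 text then (kv.2.count rk.1 : Int) else 0)).sum
      = ((rk.2.countP (pvC text) : Nat) : Int) := by
  intro rk hrk
  rw [pvIndexB_items]
  fin_cases hrk <;>
  · simp [List.countP_cons, pvC]
    split_ifs <;> simp

-- every role bumped by the index is a key of the initial scores dict
lemma pv_index_roles : ∀ kv ∈ pvIndexB.items, ∀ r ∈ kv.2, pvInitScores.contains r = true := by
  rw [pvIndexB_items]; decide

-- B's scores dict is the role/count dict
lemma pv_scoresB_eq (text : String) : pvScoresB text = PySem.Dict.mk (pvM text) := by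
  have hkeys : (pvScoresB text).keys = pvRoleKeywords.map Prod.fst := by
    rw [pvScoresB, pv_keys_scoreloop text _ _ pv_index_roles]
    decide
  have hnd : (pvScoresB text).keys.Nodup := by rw [hkeys]; decide
  apply PySem.Dict.ext
  rw [PySem.Dict.items_eq_map_keys _ hnd 0, hkeys]
  have hinit : ∀ r : String, pvInitScores.getD r 0 = 0 := by
    have he : pvInitScores = PySem.Dict.mk
        [("Data Analyst", 0), ("Machine Learning / AI", 0), ("Software Developer", 0),
         ("Marketing / Content", 0), ("Project / Operations", 0),
         ("Healthcare / Rehabilitation", 0), ("Research / Academic", 0)] := by decide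
    intro r
    rw [he]
    simp only [PySem.Dict.getD, PySem.Dict.get?_mk_cons]
    split_ifs <;> rfl
  have hget : ∀ rk ∈ pvRoleKeywords, (pvScoresB text).getD rk.1 0 = ((rk.2.countP (pvC text) : Nat) : Int) := by
    intro rk hrk
    rw [pvScoresB, pv_getD_scoreloop, hinit, zero_add, pv_contrib text rk hrk]
  have hR : (PySem.Dict.mk (pvM text)).items = pvM text := rfl
  rw [hR, List.map_map, pvM]
  exact List.map_congr_left (fun rk hrk => by
    simp only [Function.comp_apply]
    rw [hget rk hrk])

-- find? is determined by the pointwise values of the predicate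
lemma pv_find?_congr (l : List String) (p q : String → Bool) (h : ∀ a ∈ l, p a = q a) :
    l.find? p = l.find? q := by
  induction l with
  | nil => rfl
  | cons a l ih =>
    have ha := h a List.mem_cons_self
    by_cases hp : p a = true
    · rw [List.find?_cons_of_pos hp, List.find?_cons_of_pos (ha ▸ hp)]
    · rw [List.find?_cons_of_neg (by simpa using hp),
        List.find?_cons_of_neg (by simp [← ha]; simpa using hp)]
      exact ih (fun a ha' => h a (List.mem_cons_of_mem _ ha'))

-- searching the keys by looked-up value is searching the items by value (keys unique)
lemma pv_find_key (M : List (String × Int)) (m : Int) :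
    (M.map Prod.fst).Nodup →
    (M.map Prod.fst).find? (fun r => (PySem.Dict.mk M).getD r 0 == m)
      = (M.find? (fun p => p.2 == m)).map Prod.fst := by
  induction M with
  | nil => intro _; rfl
  | cons p M ih =>
    intro hnd
    obtain ⟨k, v⟩ := p
    have hself : (PySem.Dict.mk ((k, v) :: M)).getD k 0 = v := by
      simp [PySem.Dict.getD, PySem.Dict.get?_mk_cons]
    rw [List.map_cons]
    by_cases hv : (v == m) = true
    · have h1 : (k :: M.map Prod.fst).find?
          (fun r => (PySem.Dict.mk ((k, v) :: M)).getD r 0 == m) = some k :=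
        List.find?_cons_of_pos (by simp [hself, hv])
      have h2 : (((k, v) :: M).find? (fun p => p.2 == m)) = some (k, v) :=
        List.find?_cons_of_pos (by simpa using hv)
      rw [h1, h2]
      rfl
    · have h1 : (k :: M.map Prod.fst).find?
          (fun r => (PySem.Dict.mk ((k, v) :: M)).getD r 0 == m)
          = (M.map Prod.fst).find? (fun r => (PySem.Dict.mk ((k, v) :: M)).getD r 0 == m) :=
        List.find?_cons_of_neg (by simp [hself]; simpa using hv)
      have h2 : (((k, v) :: M).find? (fun p => p.2 == m)) = M.find? (fun p => p.2 == m) :=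
        List.find?_cons_of_neg (by simpa using hv)
      rw [h1, h2]
      have hcong : ∀ r ∈ M.map Prod.fst,
          (fun r => (PySem.Dict.mk ((k, v) :: M)).getD r 0 == m) r
            = (fun r => (PySem.Dict.mk M).getD r 0 == m) r := by
        intro r hr
        have hrk : ¬ (k == r) = true := by
          rw [List.map_cons, List.nodup_cons] at hnd
          intro hh
          exact hnd.1 (by rw [eq_of_beq hh]; exact hr)
        simp only [PySem.Dict.getD, PySem.Dict.get?_mk_cons, if_neg hrk]
      rw [pv_find?_congr _ _ _ hcong]
      exact ih (by simp only [List.map_cons, List.nodup_cons] at hnd; exact hnd.2)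

-- combined run of A's first-max fold, B's value-max fold and B's first-key search
lemma pv_run (M : List (String × Int)) : ∀ (r : String) (s : Int),
    ∃ r' s', M.foldl pvGA (some (r, s)) = some (r', s') ∧
      (M.map (fun p => p.2)).foldl max s = s' ∧ s ≤ s' ∧
      ((r, s) :: M).find? (fun p => p.2 == s') = some (r', s') := by
  induction M with
  | nil =>
    intro r s
    exact ⟨r, s, rfl, rfl, le_refl s, by rw [List.find?_cons_of_pos (by simp)]⟩
  | cons p M ih =>
    intro r s
    obtain ⟨p1, p2⟩ := p
    by_cases h : s < p2
    · obtain ⟨r', s', hA, hmax, hle, hf⟩ := ih p1 p2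
      refine ⟨r', s', ?_, ?_, le_trans (le_of_lt h) hle, ?_⟩
      · rw [List.foldl_cons]
        have : pvGA (some (r, s)) (p1, p2) = some (p1, p2) := by simp [pvGA, h]
        rw [this]; exact hA
      · rw [List.map_cons, List.foldl_cons, max_eq_right (le_of_lt h)]; exact hmax
      · have hne : ¬ ((s == s') = true) := by
          intro hh
          have := eq_of_beq hh
          omega
        rw [List.find?_cons_of_neg (by simpa using hne)]
        exact hf
    · obtain ⟨r', s', hA, hmax, hle, hf⟩ := ih r s
      refine ⟨r', s', ?_, ?_, hle, ?_⟩
      · rw [List.foldl_cons]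
        have : pvGA (some (r, s)) (p1, p2) = some (r, s) := by simp [pvGA, h]
        rw [this]; exact hA
      · rw [List.map_cons, List.foldl_cons, max_eq_left (le_of_not_gt h)]; exact hmax
      · by_cases hp : (s == s') = true
        · rw [List.find?_cons_of_pos (by simpa using hp)]
          rw [List.find?_cons_of_pos (by simpa using hp)] at hf
          exact hf
        · have hs : s < s' := lt_of_le_of_ne hle (by simpa using hp)
          have hp2 : ¬ ((p2 == s') = true) := by
            intro hh
            have := eq_of_beq hh
            omega
          rw [List.find?_cons_of_neg (by simpa using hp),
            List.find?_cons_of_neg (by simpa using hp2)]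
          rw [List.find?_cons_of_neg (by simpa using hp)] at hf
          exact hf

-- final assembly: A's max-by-key selection equals B's max-value-then-first-key selection
lemma pv_assemble (M : List (String × Int)) (hne : M ≠ [])
    (hnd : (M.map Prod.fst).Nodup) (fb : String) :
    ((M.foldl pvGA none).elim ""
      (fun best => if (PySem.Dict.mk M).getD best.1 0 = 0 then fb else best.1))
    = (if ((PySem.List.max? (PySem.Dict.mk M).values (fun v => v)).getD 0) = 0 then fb
       else (((PySem.Dict.mk M).keys.find? (fun r =>
         (PySem.Dict.mk M).getD r 0 == (PySem.List.max? (PySem.Dict.mk M).values (fun v => v)).getD 0)).getD "")) := by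
  obtain ⟨⟨r1, c1⟩, rest, rfl⟩ := List.exists_cons_of_ne_nil hne
  obtain ⟨r', s', hA, hmax, _, hf⟩ := pv_run rest r1 c1
  have hA' : (((r1, c1) :: rest).foldl pvGA none) = some (r', s') := by
    rw [List.foldl_cons]
    exact hA
  have hvals : (PySem.Dict.mk ((r1, c1) :: rest)).values = c1 :: rest.map (fun p => p.2) := by
    simp [PySem.Dict.values]
  have hm : (PySem.List.max? (PySem.Dict.mk ((r1, c1) :: rest)).values (fun v => v)).getD 0 = s' := by
    rw [hvals, PySem.List.max?_id_cons, hmax]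
    rfl
  have hkeys : (PySem.Dict.mk ((r1, c1) :: rest)).keys = ((r1, c1) :: rest).map Prod.fst := rfl
  have hmem : (r', s') ∈ (r1, c1) :: rest := List.mem_of_find?_eq_some hf
  have hgd : (PySem.Dict.mk ((r1, c1) :: rest)).getD r' 0 = s' :=
    PySem.Dict.getD_of_mem_items _ hmem (by simpa using hnd) 0
  rw [hA', hm, hkeys, pv_find_key _ s' hnd, hf]
  simp [hgd]

-- the main equality
lemma pv_AB (cv_text : String) (t : List (String × String)) :
    predict_role cv_text t = predict_role_alt cv_text t := by
  have hne : pvM (PySem.Str.lower cv_text) ≠ [] := by simp [pvM, pvRoleKeywords]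
  have hnd : ((pvM (PySem.Str.lower cv_text)).map Prod.fst).Nodup := by
    have : (pvM (PySem.Str.lower cv_text)).map Prod.fst = pvRoleKeywords.map Prod.fst := by
      simp [pvM, List.map_map]
    rw [this]; decide
  have hdA : pvScoresA (PySem.Str.lower cv_text) = PySem.Dict.mk (pvM (PySem.Str.lower cv_text)) := by
    rw [← pv_scoresA_items]
  have hitems : (PySem.Dict.mk (pvM (PySem.Str.lower cv_text))).items
      = pvM (PySem.Str.lower cv_text) := rfl
  simp only [predict_role, predict_role_alt, hdA, pv_scoresB_eq, hitems, pv_max_eq]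
  exact pv_assemble (pvM (PySem.Str.lower cv_text)) hne hnd _

-- ===== VERDICT (by name: the statement is the Claim_ definition above) =====
theorem predict_role_spec : Claim_equal_predict_role := by
  intro cv_text t _
  unfold Spec_predict_role
  exact pv_AB cv_text t
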